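-- pv_equiv track=rewrite | github.com/andynormancx/aoc2018 | day2.py | count_dupes
-- ===== SOURCE A (Python) =====
-- def count_dupes(input_text, match):
--     seen = dict()
--
--     for index, value in enumerate(list(input_text)):
--         if value in seen:
--             seen[value] = seen[value] + 1
--         else:
--             seen[value] = 1
--
--     for key, value in seen.items():
--         if value == match:
--             return 1
--
--     return 0
-- ===== SOURCE B (Python) =====
-- def count_dupes(input_text, match):
--     s = sorted(input_text)
--     n = len(s)
--     i = 0
--     while i < n:
--         j = i + 1
--         while j < n and s[j] == s[i]:
--             j += 1
--         if j - i == match: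
--             return 1
--         i = j
--     return 0
-- ===== Notes on version B (the rewrite author's own statement) =====
-- stated objective: alternative
-- what changed: replaced the frequency-dictionary build plus items scan with sort-then-run-length-scan: sort the characters so equal ones are adjacent, then walk the sorted list measuring each run with two indices and return 1 when a run has length match
import Mathlib
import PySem

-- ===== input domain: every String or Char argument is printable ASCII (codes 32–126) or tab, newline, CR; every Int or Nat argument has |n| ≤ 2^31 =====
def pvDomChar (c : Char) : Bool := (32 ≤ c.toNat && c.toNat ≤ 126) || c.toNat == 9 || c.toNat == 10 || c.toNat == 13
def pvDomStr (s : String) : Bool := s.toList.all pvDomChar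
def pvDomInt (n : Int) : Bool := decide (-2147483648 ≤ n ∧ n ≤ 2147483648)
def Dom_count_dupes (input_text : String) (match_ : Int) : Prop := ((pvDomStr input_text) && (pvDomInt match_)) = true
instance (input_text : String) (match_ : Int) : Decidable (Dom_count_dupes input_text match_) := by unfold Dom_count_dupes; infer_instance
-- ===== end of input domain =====

-- B replaces A's frequency-dict build + items scan with sort-then-run-length-scan
-- (a different algorithm of similar cost; not claimed faster).


-- ===== PORT A =====
-- first loop: for index, value in enumerate(list(input_text)): build `seen`
-- second loop: for key, value in seen.items(): early return 1 on value == match (= find?)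
def count_dupes (input_text : String) (match_ : Int) : Int :=
  let seen : PySem.Dict Char Int :=
    (PySem.List.enumerate input_text.toList).foldl
      (fun seen p =>
        if seen.contains p.2 then seen.insert p.2 (seen.getD p.2 0 + 1)
        else seen.insert p.2 1)
      PySem.Dict.empty
  match seen.items.find? (fun p => p.2 == match_) with
  | some _ => 1
  | none => 0

-- ===== PORT B =====
-- Source B's outer while walks the sorted list run by run: the inner `while j < n and s[j] == s[i]`
-- is the run of s[i] = takeWhile (== head) on the tail, and advancing i to j is dropWhile.
def runScan (match_ : Int) : List Char → Int
  | [] => 0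
  | x :: xs =>
      if ((xs.takeWhile (fun y => y == x)).length + 1 : Int) = match_ then 1
      else runScan match_ (xs.dropWhile (fun y => y == x))
termination_by l => l.length
decreasing_by
  simpa using Nat.lt_succ_of_le (List.length_dropWhile_le _ _)

def count_dupes_alt (input_text : String) (match_ : Int) : Int :=
  runScan match_ (PySem.List.sorted input_text.toList (fun c => c) false)

-- ===== PRECONDITION & SPEC =====
def Spec_count_dupes (input_text : String) (match_ : Int) (out : Int) : Prop := out = count_dupes_alt input_text match_
instance (input_text : String) (match_ : Int) (out : Int) : Decidable (Spec_count_dupes input_text match_ out) := by unfold Spec_count_dupes; infer_instance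

-- ===== CLAIM (what is proved, stated in full; the proofs are below) =====
def Claim_equal_count_dupes : Prop := ∀ (input_text : String) (match_ : Int), Dom_count_dupes input_text match_ → Spec_count_dupes input_text match_ (count_dupes input_text match_)

-- ===== LEMMAS AND PROOFS =====

-- folding over enumerate with a function that only uses the value = folding over the list
theorem foldl_enumerate_snd {α β : Type} (g : β → α → β) (xs : List α) :
    ∀ (s : Int) (d : β),
    (PySem.List.enumerate xs s).foldl (fun d p => g d p.2) d = xs.foldl g d := by
  induction xs with
  | nil => intro s d; simp [PySem.List.enumerate_nil]
  | cons x xs ih => intro s d; simp [PySem.List.enumerate_cons, List.foldl_cons, ih]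

-- A's dict-building step equals the counter step
theorem step_eq_counter_step (d : PySem.Dict Char Int) (x : Char) :
    (if d.contains x then d.insert x (d.getD x 0 + 1) else d.insert x 1)
      = d.insert x (d.getD x 0 + 1) := by
  by_cases h : d.contains x = true
  · simp [h]
  · have hget : d.get? x = none := by
      have := PySem.Dict.contains_eq_isSome_get? d x
      rw [this] at h
      cases hg : d.get? x with
      | none => rfl
      | some v => rw [hg] at h; simp at h
    simp [h, PySem.Dict.getD, hget]

-- A returns 1 iff some character's multiplicity in the input equals match_
theorem count_dupes_eq_any (input_text : String) (match_ : Int) :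
    count_dupes input_text match_ =
      if input_text.toList.any (fun c => (input_text.toList.count c : Int) == match_)
      then 1 else 0 := by
  unfold count_dupes
  have hfold : (PySem.List.enumerate input_text.toList).foldl
      (fun (d : PySem.Dict Char Int) p =>
        if d.contains p.2 then d.insert p.2 (d.getD p.2 0 + 1) else d.insert p.2 1)
      PySem.Dict.empty = PySem.Dict.counter input_text.toList := by
    rw [foldl_enumerate_snd
      (fun (d : PySem.Dict Char Int) x =>
        if d.contains x then d.insert x (d.getD x 0 + 1) else d.insert x 1)]
    rw [← PySem.Dict.foldl_insert_getD_add_one_eq_counter]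
    exact PySem.List.foldl_congr_mem _ _ _ _ (fun d x _ => step_eq_counter_step d x)
  simp only [hfold, PySem.Dict.items_counter, List.find?_map]
  cases h : (PySem.Set.ofList input_text.toList).find?
      (fun c => ((input_text.toList.count c : Int) == match_)) with
  | none =>
    have hnone := List.find?_eq_none.mp h
    have hany : input_text.toList.any
        (fun c => ((input_text.toList.count c : Int) == match_)) = false := by
      simp only [List.any_eq_false]
      intro c hc
      simpa using hnone c ((PySem.Set.mem_ofList _ _).mpr hc)
    simp [hany, Function.comp_def, h]
  | some c =>
    have hany : input_text.toList.any
        (fun c => ((input_text.toList.count c : Int) == match_)) = true :=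
      List.any_eq_true.mpr
        ⟨c, (PySem.Set.mem_ofList _ _).mp (List.mem_of_find?_eq_some h),
         List.find?_some (p := fun c => ((input_text.toList.count c : Int) == match_)) h⟩
    simp [hany, Function.comp_def, h]

-- in a (≤)-sorted list, elements dropped past the head's run are all ≠ head
theorem dropWhile_ne_head (x : Char) (xs : List Char)
    (hp : (x :: xs).Pairwise (· ≤ ·)) :
    ∀ y ∈ xs.dropWhile (fun y => y == x), y ≠ x := by
  intro y hy
  cases hd : xs.dropWhile (fun y => y == x) with
  | nil => simp [hd] at hy
  | cons h t =>
    have hhne : (h == x) = false := by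
      have := List.head?_dropWhile_not (p := fun y => y == x) xs
      rw [hd] at this; simpa using this
    have hhx : h ≠ x := by simpa using hhne
    have hsub : (h :: t).Sublist (x :: xs) := by
      have : (h :: t).Sublist xs := hd ▸ List.dropWhile_sublist _
      exact this.trans (List.sublist_cons_self _ _)
    have hps : (h :: t).Pairwise (· ≤ ·) := hp.sublist hsub
    have hxh : x ≤ h := by
      have hmem : h ∈ xs := (List.dropWhile_sublist _).mem (hd ▸ List.mem_cons_self)
      exact (List.pairwise_cons.mp hp).1 h hmem
    rw [hd] at hy
    rcases List.mem_cons.mp hy with rfl | hyt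
    · exact hhx
    · have hhy : h ≤ y := (List.pairwise_cons.mp hps).1 y hyt
      intro rfl'
      exact hhx (le_antisymm (rfl' ▸ hhy) hxh)

-- run-scan on a (≤)-sorted list decides "some char has multiplicity match_"
theorem runScan_eq_any (match_ : Int) :
    ∀ (s : List Char), s.Pairwise (· ≤ ·) →
    runScan match_ s = if s.any (fun c => (s.count c : Int) == match_) then 1 else 0 := by
  intro s
  induction s using runScan.induct match_ with
  | case1 => intro _; simp [runScan]
  | case2 x xs hrun =>
    intro hp
    rw [runScan]; rw [if_pos hrun]
    set t := xs.takeWhile (fun y => y == x) with ht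
    set d := xs.dropWhile (fun y => y == x) with hdd
    have hsplit : t ++ d = xs := List.takeWhile_append_dropWhile
    have hct : t.count x = t.length := by
      apply List.count_eq_length.mpr
      intro y hy
      have hy' : y ∈ List.takeWhile (fun y => y == x) xs := ht ▸ hy
      have hb : (y == x) = true :=
        List.mem_takeWhile_imp (p := fun y => y == x) (l := xs) hy'
      exact (eq_of_beq hb).symm
    have hcd : d.count x = 0 :=
      List.count_eq_zero.mpr (fun hx => dropWhile_ne_head x xs hp x (hdd ▸ hx) rfl)
    have hcx : ((x :: xs).count x : Int) = match_ := by
      have hcc : (x :: xs).count x = t.length + 1 := by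
        rw [List.count_cons_self, ← hsplit, List.count_append, hct, hcd]
      rw [hcc]; push_cast; linarith [hrun]
    have hany : (x :: xs).any (fun c => ((x :: xs).count c : Int) == match_) = true :=
      List.any_eq_true.mpr ⟨x, List.mem_cons_self, by simpa using hcx⟩
    simp [hany]
  | case3 x xs hrun ih =>
    intro hp
    rw [runScan]; rw [if_neg hrun]
    set t := xs.takeWhile (fun y => y == x) with ht
    set d := xs.dropWhile (fun y => y == x) with hdd
    have hsplit : t ++ d = xs := List.takeWhile_append_dropWhile
    have hdsub : d.Sublist (x :: xs) := by
      rw [hdd]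
      exact (List.dropWhile_sublist _).trans (List.sublist_cons_self _ _)
    have hdp : d.Pairwise (· ≤ ·) := hp.sublist hdsub
    have hdne : ∀ y ∈ d, y ≠ x := fun y hy => dropWhile_ne_head x xs hp y (hdd ▸ hy)
    -- counts of non-x chars agree between x::xs and d
    have hcnt : ∀ c, c ≠ x → (x :: xs).count c = d.count c := by
      intro c hc
      have hctc : t.count c = 0 := List.count_eq_zero.mpr (fun hmem => by
        have hm' : c ∈ List.takeWhile (fun y => y == x) xs := ht ▸ hmem
        have hb : (c == x) = true :=
          List.mem_takeWhile_imp (p := fun y => y == x) (l := xs) hm'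
        exact hc (eq_of_beq hb))
      have h1 : (x :: xs).count c = xs.count c := by
        simp [Ne.symm hc]
      rw [h1, ← hsplit, List.count_append, hctc, Nat.zero_add]
    -- count of x in x::xs is the run length, which is ≠ match_
    have hcx : (((x :: xs).count x : Int) == match_) = false := by
      have hct2 : t.count x = t.length := by
        apply List.count_eq_length.mpr
        intro y hy
        have hy' : y ∈ List.takeWhile (fun y => y == x) xs := ht ▸ hy
        have hb : (y == x) = true :=
          List.mem_takeWhile_imp (p := fun y => y == x) (l := xs) hy'
        exact (eq_of_beq hb).symm
      have hcd : d.count x = 0 := List.count_eq_zero.mpr (fun hx => hdne x hx rfl)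
      have hcc : (x :: xs).count x = t.length + 1 := by
        rw [List.count_cons_self, ← hsplit, List.count_append, hct2, hcd]
      simp only [hcc, beq_eq_false_iff_ne, ne_eq]
      intro hEq; apply hrun; push_cast at hEq ⊢; linarith
    rw [ih hdp]
    -- the two `any`s agree
    have hsame : d.any (fun c => (d.count c : Int) == match_)
        = (x :: xs).any (fun c => ((x :: xs).count c : Int) == match_) := by
      apply Bool.eq_iff_iff.mpr
      simp only [List.any_eq_true]
      constructor
      · rintro ⟨c, hc, hv⟩
        refine ⟨c, hdsub.mem hc, ?_⟩
        rw [hcnt c (hdne c hc)]; exact hv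
      · rintro ⟨c, hc, hv⟩
        have hcnex : c ≠ x := by
          intro h; subst h; rw [hcx] at hv; exact Bool.false_ne_true hv
        have hcd2 : c ∈ d := by
          rcases List.mem_cons.mp hc with h | hcxs
          · exact absurd h hcnex
          · rcases (List.mem_append.mp (hsplit ▸ hcxs)) with hctm | hcdm
            · exact absurd (by simpa using List.mem_takeWhile_imp hctm) hcnex
            · exact hcdm
        refine ⟨c, hcd2, ?_⟩
        rw [← hcnt c hcnex]; exact hv
    rw [hsame]

-- ===== VERDICT (by name: the statement is the Claim_ definition above) =====
theorem count_dupes_spec : Claim_equal_count_dupes := by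
  intro input_text match_ _
  unfold Spec_count_dupes count_dupes_alt
  set l := input_text.toList
  set s := PySem.List.sorted l (fun c => c) false with hs
  have hperm : s.Perm l := PySem.List.sorted_perm l (fun c => c) false
  have hpair : s.Pairwise (· ≤ ·) := by
    simpa using PySem.List.sorted_pairwise l (fun c => c)
  rw [count_dupes_eq_any, runScan_eq_any match_ s hpair]
  have hcount : ∀ c, s.count c = l.count c := fun c => hperm.count_eq c
  have hsame : l.any (fun c => (l.count c : Int) == match_)
      = s.any (fun c => (s.count c : Int) == match_) := by
    apply Bool.eq_iff_iff.mpr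
    simp only [List.any_eq_true]
    constructor
    · rintro ⟨c, hc, hv⟩
      exact ⟨c, hperm.mem_iff.mpr hc, by rw [hcount c]; exact hv⟩
    · rintro ⟨c, hc, hv⟩
      exact ⟨c, hperm.mem_iff.mp hc, by rw [← hcount c]; exact hv⟩
  rw [hsame]
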